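-- pv_equiv track=rewrite | github.com/SimonOuellette35/GridCoder2024 | Hodel_primitives_full_trainingV2.py | hperiod
-- ===== SOURCE A (Python) =====
-- def width(piece):
--     """ width of grid or patch """
--     if len(piece) == 0:
--         return 0
--     if isinstance(piece, tuple):
--         return len(piece[0])
--     return rightmost(piece) - leftmost(piece) + 1
--
-- def toindices(patch):
--     """ indices of object cells """
--     if len(patch) == 0:
--         return frozenset()
--     if isinstance(next(iter(patch))[1], tuple):
--         return frozenset(index for value, index in patch)
--     return patch
--
-- def shift(patch, directions):
--     """ shift patch """
--     if len(patch) == 0: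
--         return patch
--     di, dj = directions
--     if isinstance(next(iter(patch))[1], tuple):
--         return frozenset((value, (i + di, j + dj)) for value, (i, j) in patch)
--     return frozenset((i + di, j + dj) for i, j in patch)
--
-- def normalize(patch):
--     """ moves upper left corner to origin """
--     if len(patch) == 0:
--         return patch
--     return shift(patch, (-uppermost(patch), -leftmost(patch)))
--
-- def uppermost(patch):
--     """ row index of uppermost occupied cell """
--     return min(i for i, j in toindices(patch))
--
-- def leftmost(patch):
--     """ column index of leftmost occupied cell """
--     return min(j for i, j in toindices(patch))
--
-- def rightmost(patch):
--     """ column index of rightmost occupied cell """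
--     return max(j for i, j in toindices(patch))
--
-- def index(grid, loc):
--     """ color at location """
--     i, j = loc
--     h, w = len(grid), len(grid[0])
--     if not (0 <= i < h and 0 <= j < w):
--         return None
--     return grid[loc[0]][loc[1]]
--
-- def hperiod(obj):
--     """ horizontal periodicity """
--     normalized = normalize(obj)
--     w = width(normalized)
--     for p in range(1, w):
--         offsetted = shift(normalized, (0, -p))
--         pruned = frozenset({(c, (i, j)) for c, (i, j) in offsetted if j >= 0})
--         if pruned.issubset(normalized):
--             return p
--     return w
-- ===== SOURCE B (Python) =====
-- def hperiod(obj):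
--     """ horizontal periodicity (column-index approach: group cells by column, check per-column subset shifts) """
--     if not obj:
--         return 0
--     cols = {}
--     for c, (i, j) in obj:
--         if j in cols:
--             cols[j].add((c, i))
--         else:
--             cols[j] = {(c, i)}
--     minj = min(cols)
--     w = max(cols) - minj + 1
--     for p in range(1, w):
--         if all(cols[j] <= cols.get(j - p, frozenset())
--                for j in cols if j - minj >= p):
--             return p
--     return w
-- ===== Notes on version B (the rewrite author's own statement) =====
-- stated objective: faster
-- what changed: Replaces the per-period shift/prune/frozenset-rebuild of the whole normalized patch with a column-keyed index built once (column j -> set of (color,row)), checking each candidate period by per-column subset tests with no normalization and no per-period set construction.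
import Mathlib
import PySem

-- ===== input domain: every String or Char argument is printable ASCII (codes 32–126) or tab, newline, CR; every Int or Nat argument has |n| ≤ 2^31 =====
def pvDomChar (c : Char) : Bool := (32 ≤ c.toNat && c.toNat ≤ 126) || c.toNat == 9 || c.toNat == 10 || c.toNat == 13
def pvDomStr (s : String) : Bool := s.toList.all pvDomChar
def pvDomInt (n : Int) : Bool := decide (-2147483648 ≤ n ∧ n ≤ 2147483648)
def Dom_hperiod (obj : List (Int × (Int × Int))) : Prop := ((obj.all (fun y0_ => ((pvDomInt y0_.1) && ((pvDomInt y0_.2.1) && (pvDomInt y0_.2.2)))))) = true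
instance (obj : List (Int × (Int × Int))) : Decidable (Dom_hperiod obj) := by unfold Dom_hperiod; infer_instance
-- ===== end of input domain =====

-- B replaces A's per-period shift/prune/frozenset-rebuild of the whole normalized patch by a
-- column-keyed index built once, checked with per-column subset tests (no per-period set
-- construction; a timing run measured B faster). Neither version mutates its argument.

-- ===== PORT A =====
-- 'obj' is always in colored form (value, (i, j)); the non-colored isinstance branches of the
-- Python helpers are unreachable at this element type and are not transliterated.
def toindicesA (patch : List (Int × (Int × Int))) : List (Int × Int) :=
  if patch = [] then [] else PySem.Set.ofList (patch.map (fun x => x.2))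

-- Python min()/max() over an empty generator raises; every caller guards non-emptiness,
-- so the `.getD 0` defaults below are unreachable.
def uppermostA (patch : List (Int × (Int × Int))) : Int :=
  (PySem.List.min? ((toindicesA patch).map (fun ij => ij.1)) (fun y => y)).getD 0

def leftmostA (patch : List (Int × (Int × Int))) : Int :=
  (PySem.List.min? ((toindicesA patch).map (fun ij => ij.2)) (fun y => y)).getD 0

def rightmostA (patch : List (Int × (Int × Int))) : Int :=
  (PySem.List.max? ((toindicesA patch).map (fun ij => ij.2)) (fun y => y)).getD 0

def shiftA (patch : List (Int × (Int × Int))) (dir : Int × Int) : List (Int × (Int × Int)) :=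
  if patch = [] then patch
  else PySem.Set.ofList (patch.map (fun x => (x.1, (x.2.1 + dir.1, x.2.2 + dir.2))))

def normalizeA (patch : List (Int × (Int × Int))) : List (Int × (Int × Int)) :=
  if patch = [] then patch else shiftA patch (-(uppermostA patch), -(leftmostA patch))

-- width: the isinstance(piece, tuple) grid branch is unreachable (piece is a patch here)
def widthA (piece : List (Int × (Int × Int))) : Int :=
  if piece = [] then 0 else rightmostA piece - leftmostA piece + 1

def loopA (normalized : List (Int × (Int × Int))) (w : Int) : List Int → Int
  | [] => w
  | p :: ps =>
    let offsetted := shiftA normalized (0, -p)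
    let pruned : PySem.Set (Int × (Int × Int)) :=
      PySem.Set.ofList (offsetted.filter (fun x => decide (0 ≤ x.2.2)))
    if PySem.Set.issubset pruned normalized then p else loopA normalized w ps

def hperiod (obj : List (Int × (Int × Int))) : Int :=
  let normalized := normalizeA obj
  let w := widthA normalized
  loopA normalized w (PySem.List.pyRange 1 w 1)

-- ===== PORT B =====
-- column index: cols[j] = set of (color, row) of the cells in column j
-- (both Python branches store under key j: in-place .add = overwrite at the same key)
def colsB (obj : List (Int × (Int × Int))) : PySem.Dict Int (PySem.Set (Int × Int)) :=
  obj.foldl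
    (fun d x =>
      d.insert x.2.2
        (match d.get? x.2.2 with
         | some s => PySem.Set.add s (x.1, x.2.1)
         | none => PySem.Set.ofList [(x.1, x.2.1)]))
    PySem.Dict.empty

def checkB (cols : PySem.Dict Int (PySem.Set (Int × Int))) (minj p : Int) : Bool :=
  cols.keys.all (fun j =>
    !(decide (p ≤ j - minj)) || PySem.Set.issubset (cols.getD j []) (cols.getD (j - p) []))

def loopB (cols : PySem.Dict Int (PySem.Set (Int × Int))) (minj w : Int) : List Int → Int
  | [] => w
  | p :: ps => if checkB cols minj p then p else loopB cols minj w ps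

def hperiod_alt (obj : List (Int × (Int × Int))) : Int :=
  if obj = [] then 0
  else
    let cols := colsB obj
    -- Python min()/max() over the non-empty key view; the `.getD 0` defaults are unreachable
    let minj := (PySem.List.min? cols.keys (fun y => y)).getD 0
    let w := (PySem.List.max? cols.keys (fun y => y)).getD 0 - minj + 1
    loopB cols minj w (PySem.List.pyRange 1 w 1)

-- ===== PRECONDITION & SPEC =====
def Spec_hperiod (obj : List (Int × (Int × Int))) (out : Int) : Prop := out = hperiod_alt obj
instance (obj : List (Int × (Int × Int))) (out : Int) : Decidable (Spec_hperiod obj out) := by unfold Spec_hperiod; infer_instance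

-- ===== CLAIM (what is proved, stated in full; the proofs are below) =====
def Claim_equal_hperiod : Prop := ∀ (obj : List (Int × (Int × Int))), Dom_hperiod obj → Spec_hperiod obj (hperiod obj)

-- min/max over Int lists depend only on membership
lemma min?_congr_mem (xs ys : List Int) (h : ∀ a, a ∈ xs ↔ a ∈ ys) :
    PySem.List.min? xs (fun y => y) = PySem.List.min? ys (fun y => y) := by
  cases hx : PySem.List.min? xs (fun y => y) with
  | none =>
      rw [PySem.List.min?_eq_none_iff] at hx
      subst hx
      rw [eq_comm, PySem.List.min?_eq_none_iff]
      exact List.eq_nil_iff_forall_not_mem.mpr (fun a ha => by simpa using (h a).mpr ha)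
  | some m =>
      have hm := PySem.List.min?_mem hx
      have hmin := PySem.List.min?_isMin hx
      cases hy : PySem.List.min? ys (fun y => y) with
      | none =>
          rw [PySem.List.min?_eq_none_iff] at hy
          rw [hy] at h
          simpa using (h m).mp hm
      | some m' =>
          have hm' := PySem.List.min?_mem hy
          have hmin' := PySem.List.min?_isMin hy
          have h1 : m ≤ m' := hmin m' ((h m').mpr hm')
          have h2 : m' ≤ m := hmin' m ((h m).mp hm)
          rw [le_antisymm h1 h2]

lemma max?_congr_mem (xs ys : List Int) (h : ∀ a, a ∈ xs ↔ a ∈ ys) :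
    PySem.List.max? xs (fun y => y) = PySem.List.max? ys (fun y => y) := by
  cases hx : PySem.List.max? xs (fun y => y) with
  | none =>
      rw [PySem.List.max?_eq_none_iff] at hx
      subst hx
      rw [eq_comm, PySem.List.max?_eq_none_iff]
      exact List.eq_nil_iff_forall_not_mem.mpr (fun a ha => by simpa using (h a).mpr ha)
  | some m =>
      have hm := PySem.List.max?_mem hx
      have hmax := PySem.List.max?_isMax hx
      cases hy : PySem.List.max? ys (fun y => y) with
      | none =>
          rw [PySem.List.max?_eq_none_iff] at hy
          rw [hy] at h
          simpa using (h m).mp hm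
      | some m' =>
          have hm' := PySem.List.max?_mem hy
          have hmax' := PySem.List.max?_isMax hy
          have h1 : m' ≤ m := hmax m' ((h m').mpr hm')
          have h2 : m ≤ m' := hmax' m ((h m).mp hm)
          rw [le_antisymm h2 h1]

lemma foldl_min_map_add (t : List Int) (x c : Int) :
    (t.map (fun y => y + c)).foldl min (x + c) = t.foldl min x + c := by
  induction t generalizing x with
  | nil => simp
  | cons a t ih =>
      rw [List.map_cons, List.foldl_cons, List.foldl_cons, min_add_add_right]
      exact ih (min x a)

lemma foldl_max_map_add (t : List Int) (x c : Int) :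
    (t.map (fun y => y + c)).foldl max (x + c) = t.foldl max x + c := by
  induction t generalizing x with
  | nil => simp
  | cons a t ih =>
      rw [List.map_cons, List.foldl_cons, List.foldl_cons, max_add_add_right]
      exact ih (max x a)

lemma min?_map_add (xs : List Int) (c : Int) :
    PySem.List.min? (xs.map (fun y => y + c)) (fun y => y)
      = (PySem.List.min? xs (fun y => y)).map (fun y => y + c) := by
  cases xs with
  | nil =>
      rw [List.map_nil, (PySem.List.min?_eq_none_iff _ _).mpr rfl]
      rfl
  | cons x t =>
      rw [List.map_cons, PySem.List.min?_id_cons, PySem.List.min?_id_cons]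
      simp [foldl_min_map_add]

lemma max?_map_add (xs : List Int) (c : Int) :
    PySem.List.max? (xs.map (fun y => y + c)) (fun y => y)
      = (PySem.List.max? xs (fun y => y)).map (fun y => y + c) := by
  cases xs with
  | nil =>
      rw [List.map_nil, (PySem.List.max?_eq_none_iff _ _).mpr rfl]
      rfl
  | cons x t =>
      rw [List.map_cons, PySem.List.max?_id_cons, PySem.List.max?_id_cons]
      simp [foldl_max_map_add]

lemma mem_normalizeA (obj : List (Int × (Int × Int))) (hne : obj ≠ []) (y : Int × (Int × Int)) :
    y ∈ normalizeA obj ↔ (y.1, (y.2.1 + uppermostA obj, y.2.2 + leftmostA obj)) ∈ obj := by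
  unfold normalizeA shiftA
  simp only [hne, if_false]
  rw [PySem.Set.mem_ofList, List.mem_map]
  obtain ⟨c, i, j⟩ := y
  constructor
  · rintro ⟨⟨c', i', j'⟩, hx, hx2⟩
    simp only [Prod.mk.injEq] at hx2
    obtain ⟨rfl, h1, h2⟩ := hx2
    have : i + uppermostA obj = i' := by omega
    have : j + leftmostA obj = j' := by omega
    simp_all
  · intro h
    exact ⟨(c, (i + uppermostA obj, j + leftmostA obj)), h, by simp⟩

lemma normalizeA_ne_nil (obj : List (Int × (Int × Int))) (hne : obj ≠ []) :
    normalizeA obj ≠ [] := by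
  obtain ⟨x, t, rfl⟩ := List.exists_cons_of_ne_nil hne
  intro h
  have := (mem_normalizeA _ hne (x.1, (x.2.1 - uppermostA (x :: t), x.2.2 - leftmostA (x :: t)))).mpr
    (by simp)
  rw [h] at this
  simp at this

lemma colsB_getD_mem (l : List (Int × (Int × Int))) :
    ∀ (d : PySem.Dict Int (PySem.Set (Int × Int))) (c i j : Int),
      (c, i) ∈ (l.foldl
          (fun d x =>
            d.insert x.2.2
              (match d.get? x.2.2 with
               | some s => PySem.Set.add s (x.1, x.2.1)
               | none => PySem.Set.ofList [(x.1, x.2.1)])) d).getD j []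
        ↔ (c, (i, j)) ∈ l ∨ (c, i) ∈ d.getD j [] := by
  induction l with
  | nil => intro d c i j; simp
  | cons x t ih =>
      intro d c i j
      rw [List.foldl_cons, ih]
      by_cases hj : j = x.2.2
      · subst hj
        rw [PySem.Dict.getD_insert]
        rw [if_pos rfl]
        cases hg : d.get? x.2.2 with
        | some s =>
            rw [PySem.Dict.getD_of_get?_eq_some d [] hg]
            simp only [PySem.Set.mem_add, List.mem_cons, Prod.ext_iff]
            constructor
            · rintro (h | (hs | he)) <;> simp_all
            · rintro ((h | hs) | he) <;> simp_all
        | none =>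
            rw [PySem.Dict.getD_of_get?_eq_none d [] hg]
            simp only [List.mem_cons, Prod.ext_iff]
            constructor
            · rintro (h | hs) <;> simp_all
            · rintro ((h | hs) | he) <;> simp_all
      · rw [PySem.Dict.getD_insert, if_neg hj]
        simp only [List.mem_cons, Prod.ext_iff]
        constructor
        · tauto
        · rintro ((h | hs) | he) <;> simp_all
lemma colsB_getD_mem' (obj : List (Int × (Int × Int))) (c i j : Int) :
    (c, i) ∈ (colsB obj).getD j [] ↔ (c, (i, j)) ∈ obj := by
  rw [colsB, colsB_getD_mem]
  simp

lemma colsB_keys_mem (obj : List (Int × (Int × Int))) (j : Int) :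
    j ∈ (colsB obj).keys ↔ j ∈ obj.map (fun x => x.2.2) := by
  rw [colsB, PySem.Dict.keys_foldl_insert_key obj (fun x => x.2.2) _ PySem.Dict.empty,
    PySem.Dict.keys_empty]
  exact PySem.Set.mem_ofList _ _

lemma toindices_j_mem (obj : List (Int × (Int × Int))) (hne : obj ≠ []) (a : Int) :
    a ∈ (toindicesA obj).map (fun ij => ij.2) ↔ a ∈ obj.map (fun x => x.2.2) := by
  unfold toindicesA
  rw [if_neg hne]
  simp only [List.mem_map, PySem.Set.mem_ofList]
  constructor
  · rintro ⟨p, ⟨x, hx, rfl⟩, rfl⟩; exact ⟨x, hx, rfl⟩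
  · rintro ⟨x, hx, rfl⟩; exact ⟨x.2, ⟨x, hx, rfl⟩, rfl⟩

lemma normalized_j_mem (obj : List (Int × (Int × Int))) (hne : obj ≠ []) (a : Int) :
    a ∈ (toindicesA (normalizeA obj)).map (fun ij => ij.2)
      ↔ a ∈ (obj.map (fun x => x.2.2)).map (fun y => y + -(leftmostA obj)) := by
  rw [toindices_j_mem _ (normalizeA_ne_nil obj hne)]
  simp only [List.mem_map]
  constructor
  · rintro ⟨y, hy, rfl⟩
    rw [mem_normalizeA obj hne] at hy
    exact ⟨y.2.2 + leftmostA obj, ⟨_, hy, rfl⟩, by omega⟩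
  · rintro ⟨b, ⟨x, hx, rfl⟩, rfl⟩
    refine ⟨(x.1, (x.2.1 + -(uppermostA obj), x.2.2 + -(leftmostA obj))), ?_, rfl⟩
    rw [mem_normalizeA obj hne]
    simpa using hx

lemma width_eq (obj : List (Int × (Int × Int))) (hne : obj ≠ []) :
    widthA (normalizeA obj) =
      (PySem.List.max? (obj.map (fun x => x.2.2)) (fun y => y)).getD 0
        - (PySem.List.min? (obj.map (fun x => x.2.2)) (fun y => y)).getD 0 + 1 := by
  unfold widthA
  rw [if_neg (normalizeA_ne_nil obj hne)]
  unfold rightmostA leftmostA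
  rw [min?_congr_mem _ _ (normalized_j_mem obj hne),
    max?_congr_mem _ _ (normalized_j_mem obj hne), min?_map_add, max?_map_add]
  cases hmin : PySem.List.min? (obj.map (fun x => x.2.2)) (fun y => y) with
  | none =>
      rw [PySem.List.min?_eq_none_iff] at hmin
      simp at hmin
      exact absurd hmin hne
  | some m =>
      cases hmax : PySem.List.max? (obj.map (fun x => x.2.2)) (fun y => y) with
      | none =>
          rw [PySem.List.max?_eq_none_iff] at hmax
          simp at hmax
          exact absurd hmax hne
      | some M => simp

lemma leftmostA_eq_minjs (obj : List (Int × (Int × Int))) (hne : obj ≠ []) :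
    leftmostA obj = (PySem.List.min? (obj.map (fun x => x.2.2)) (fun y => y)).getD 0 := by
  unfold leftmostA
  rw [min?_congr_mem _ _ (toindices_j_mem obj hne)]

lemma minj_keys_eq (obj : List (Int × (Int × Int))) :
    PySem.List.min? (colsB obj).keys (fun y => y)
      = PySem.List.min? (obj.map (fun x => x.2.2)) (fun y => y) :=
  min?_congr_mem _ _ (colsB_keys_mem obj)

lemma maxj_keys_eq (obj : List (Int × (Int × Int))) :
    PySem.List.max? (colsB obj).keys (fun y => y)
      = PySem.List.max? (obj.map (fun x => x.2.2)) (fun y => y) :=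
  max?_congr_mem _ _ (colsB_keys_mem obj)

lemma cond_eq (obj : List (Int × (Int × Int))) (hne : obj ≠ []) (p : Int) :
    PySem.Set.issubset
        (PySem.Set.ofList ((shiftA (normalizeA obj) (0, -p)).filter (fun x => decide (0 ≤ x.2.2))))
        (normalizeA obj)
      = checkB (colsB obj) ((PySem.List.min? (colsB obj).keys (fun y => y)).getD 0) p := by
  have hm : ((PySem.List.min? (colsB obj).keys (fun y => y)).getD 0) = leftmostA obj := by
    rw [minj_keys_eq, ← leftmostA_eq_minjs obj hne]
  rw [Bool.eq_iff_iff, PySem.Set.issubset_iff, hm]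
  have hNne := normalizeA_ne_nil obj hne
  constructor
  · intro hA
    unfold checkB
    rw [List.all_eq_true]
    intro j hj
    by_cases hp : p ≤ j - leftmostA obj
    · rw [Bool.or_eq_true]
      right
      rw [PySem.Set.issubset_iff]
      intro v hv
      have hx : (v.1, (v.2, j)) ∈ obj := (colsB_getD_mem' obj v.1 v.2 j).mp hv
      have hz : (v.1, (v.2 - uppermostA obj, j - leftmostA obj)) ∈ normalizeA obj := by
        rw [mem_normalizeA obj hne]
        have e : ((v.1, (v.2 - uppermostA obj, j - leftmostA obj)).1,
            ((v.1, (v.2 - uppermostA obj, j - leftmostA obj)).2.1 + uppermostA obj,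
             (v.1, (v.2 - uppermostA obj, j - leftmostA obj)).2.2 + leftmostA obj))
            = (v.1, (v.2, j)) := by
          simp only [Prod.mk.injEq]
          exact ⟨trivial, by omega, by omega⟩
        rw [e]
        exact hx
      have hy : (v.1, (v.2 - uppermostA obj + 0, j - leftmostA obj + -p))
          ∈ PySem.Set.ofList
            ((shiftA (normalizeA obj) (0, -p)).filter (fun x => decide (0 ≤ x.2.2))) := by
        rw [PySem.Set.mem_ofList, List.mem_filter]
        constructor
        · unfold shiftA
          rw [if_neg hNne, PySem.Set.mem_ofList, List.mem_map]
          exact ⟨_, hz, rfl⟩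
        · simp only [decide_eq_true_eq]
          omega
      have hyN := hA _ hy
      rw [mem_normalizeA obj hne] at hyN
      have e2 : ((v.1, (v.2 - uppermostA obj + 0, j - leftmostA obj + -p)).1,
          ((v.1, (v.2 - uppermostA obj + 0, j - leftmostA obj + -p)).2.1 + uppermostA obj,
           (v.1, (v.2 - uppermostA obj + 0, j - leftmostA obj + -p)).2.2 + leftmostA obj))
          = (v.1, (v.2, j - p)) := by
        simp only [Prod.mk.injEq]
        exact ⟨trivial, by omega, by omega⟩
      rw [e2] at hyN
      exact (colsB_getD_mem' obj v.1 v.2 (j - p)).mpr hyN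
    · rw [Bool.or_eq_true]
      left
      simp [hp]
  · intro hB y hy
    rw [PySem.Set.mem_ofList, List.mem_filter] at hy
    obtain ⟨hy1, hy2⟩ := hy
    rw [shiftA, if_neg hNne, PySem.Set.mem_ofList, List.mem_map] at hy1
    obtain ⟨z, hz, rfl⟩ := hy1
    simp only [decide_eq_true_eq] at hy2
    have hxz : (z.1, (z.2.1 + uppermostA obj, z.2.2 + leftmostA obj)) ∈ obj :=
      (mem_normalizeA obj hne z).mp hz
    have hj : z.2.2 + leftmostA obj ∈ (colsB obj).keys := by
      rw [colsB_keys_mem, List.mem_map]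
      exact ⟨_, hxz, rfl⟩
    unfold checkB at hB
    rw [List.all_eq_true] at hB
    have hB' := hB _ hj
    rw [Bool.or_eq_true] at hB'
    have hsub : PySem.Set.issubset ((colsB obj).getD (z.2.2 + leftmostA obj) [])
        ((colsB obj).getD (z.2.2 + leftmostA obj - p) []) = true := by
      rcases hB' with h | h
      · exfalso
        simp only [Bool.not_eq_true', decide_eq_false_iff_not] at h
        omega
      · exact h
    rw [PySem.Set.issubset_iff] at hsub
    have hv1 : (z.1, z.2.1 + uppermostA obj) ∈ (colsB obj).getD (z.2.2 + leftmostA obj) [] :=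
      (colsB_getD_mem' obj z.1 (z.2.1 + uppermostA obj) (z.2.2 + leftmostA obj)).mpr hxz
    have hv2 := hsub _ hv1
    have hx2 : (z.1, (z.2.1 + uppermostA obj, z.2.2 + leftmostA obj - p)) ∈ obj :=
      (colsB_getD_mem' obj z.1 (z.2.1 + uppermostA obj) (z.2.2 + leftmostA obj - p)).mp hv2
    rw [mem_normalizeA obj hne]
    have e : ((z.1, (z.2.1 + 0, z.2.2 + -p)).1,
        ((z.1, (z.2.1 + 0, z.2.2 + -p)).2.1 + uppermostA obj,
         (z.1, (z.2.1 + 0, z.2.2 + -p)).2.2 + leftmostA obj))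
        = (z.1, (z.2.1 + uppermostA obj, z.2.2 + leftmostA obj - p)) := by
      simp only [Prod.mk.injEq]
      exact ⟨trivial, by omega, by omega⟩
    rw [e]
    exact hx2

lemma loop_eq (obj : List (Int × (Int × Int))) (hne : obj ≠ []) :
    ∀ (ps : List Int) (w : Int),
      loopA (normalizeA obj) w ps
        = loopB (colsB obj) ((PySem.List.min? (colsB obj).keys (fun y => y)).getD 0) w ps := by
  intro ps
  induction ps with
  | nil => intro w; rfl
  | cons p ps ih =>
      intro w
      simp only [loopA, loopB]
      rw [cond_eq obj hne p]
      split
      · rfl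
      · exact ih w

-- ===== VERDICT (by name: the statement is the Claim_ definition above) =====
theorem hperiod_spec : Claim_equal_hperiod := by
  unfold Claim_equal_hperiod Spec_hperiod
  intro obj _
  by_cases hne : obj = []
  · subst hne; rfl
  · show loopA (normalizeA obj) (widthA (normalizeA obj))
        (PySem.List.pyRange 1 (widthA (normalizeA obj)) 1) = hperiod_alt obj
    have halt : hperiod_alt obj
        = loopB (colsB obj) ((PySem.List.min? (colsB obj).keys (fun y => y)).getD 0)
            ((PySem.List.max? (colsB obj).keys (fun y => y)).getD 0
              - (PySem.List.min? (colsB obj).keys (fun y => y)).getD 0 + 1)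
            (PySem.List.pyRange 1
              ((PySem.List.max? (colsB obj).keys (fun y => y)).getD 0
                - (PySem.List.min? (colsB obj).keys (fun y => y)).getD 0 + 1) 1) := by
      unfold hperiod_alt
      rw [if_neg hne]
    rw [halt]
    have hw : widthA (normalizeA obj)
        = (PySem.List.max? (colsB obj).keys (fun y => y)).getD 0
          - (PySem.List.min? (colsB obj).keys (fun y => y)).getD 0 + 1 := by
      rw [width_eq obj hne, minj_keys_eq, maxj_keys_eq]
    rw [hw]
    exact loop_eq obj hne _ _
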